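-- pv_equiv track=rewrite | github.com/kentumut/Stanford-Algorithms-Specialization | Greedy Algorithms/number_clusters.py | hamming_neighbors
-- ===== SOURCE A (Python) =====
-- from typing import List, Set
-- import itertools
--
-- def hamming_neighbors(label: str, distance: int) -> Set[str]:
--     neighbors = set()
--     indices = range(len(label))
--     for flip_indices in itertools.combinations(indices, distance):
--         neighbor = list(label)
--         for idx in flip_indices:
--             neighbor[idx] = '1' if neighbor[idx] == '0' else '0'
--         neighbors.add(''.join(neighbor))
--     return neighbors
-- ===== SOURCE B (Python) =====
-- def hamming_neighbors(label: str, distance: int):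
--     # Recursive backtracking over the character list: at each position either
--     # keep the character or flip it ('0'->'1', anything else ->'0'), spending
--     # one of the remaining flips; prune when more flips remain than positions.
--     def go(cs, k):
--         if k > len(cs):
--             return []
--         if not cs:
--             return [[]] if k == 0 else []
--         c, rest = cs[0], cs[1:]
--         out = []
--         if k > 0:
--             f = '1' if c == '0' else '0'
--             out.extend([f] + tail for tail in go(rest, k - 1))
--         out.extend([c] + tail for tail in go(rest, k))
--         return out
--     return {''.join(chars) for chars in go(list(label), distance)}
-- ===== Notes on version B (the rewrite author's own statement) =====
-- stated objective: alternative
-- what changed: Replaced the itertools.combinations loop over index tuples (rebuilding list(label) and patching it per tuple) by direct recursive backtracking on the character list that keeps or flips each position while counting remaining flips, pruning when more flips remain than positions.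
import Mathlib
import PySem

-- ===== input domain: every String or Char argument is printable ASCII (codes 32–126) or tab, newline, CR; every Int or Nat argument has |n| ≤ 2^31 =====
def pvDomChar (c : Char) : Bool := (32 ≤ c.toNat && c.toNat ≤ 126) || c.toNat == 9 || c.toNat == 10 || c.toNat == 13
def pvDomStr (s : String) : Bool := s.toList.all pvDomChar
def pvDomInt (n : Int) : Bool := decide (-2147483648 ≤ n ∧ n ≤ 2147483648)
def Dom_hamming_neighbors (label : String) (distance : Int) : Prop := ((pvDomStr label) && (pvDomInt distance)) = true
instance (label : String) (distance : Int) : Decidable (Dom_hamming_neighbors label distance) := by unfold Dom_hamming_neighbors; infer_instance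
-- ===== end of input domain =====

-- B replaces the itertools.combinations enumeration of index tuples by recursive
-- keep-or-flip backtracking over the character list (alternative decomposition, same cost).
-- A raises ValueError on distance < 0 (excluded by Pre_); B returns the empty set there.

-- ===== PORT A =====
-- itertools.combinations(xs, r) for r ≥ 0, in itertools' lexicographic order
def pvComb : List Int → Nat → List (List Int)
  | _, 0 => [[]]
  | [], _+1 => []
  | x :: rest, k+1 => (pvComb rest k).map (x :: ·) ++ pvComb rest (k+1)

-- neighbor[idx] = '1' if neighbor[idx] == '0' else '0'   (idx always in range here)
def pvFlipAt (cs : List Char) (idx : Int) : List Char :=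
  PySem.List.pySetD cs idx (if PySem.List.pyGetD cs idx ' ' == '0' then '1' else '0')

-- the 'if distance < 0 then []' branch is the region excluded by Pre_ (A raises ValueError there)
def hamming_neighbors (label : String) (distance : Int) : List String :=
  if distance < 0 then [] else
  (pvComb (PySem.List.pyRange 0 (label.toList.length : Int) 1) distance.toNat).foldl
    (fun neighbors combo =>
      PySem.Set.add neighbors (String.mk (combo.foldl pvFlipAt label.toList)))
    PySem.Set.empty

-- ===== PORT B =====
-- go(cs, k): all character lists obtained from cs by flipping exactly k positions,
-- flip-branch first, with the prune 'k > len(cs)'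
def pvGo : List Char → Nat → List (List Char)
  | cs, k =>
    if cs.length < k then []
    else match cs, k with
      | [], k => if k == 0 then [[]] else []
      | c :: rest, 0 => (pvGo rest 0).map (c :: ·)
      | c :: rest, s+1 =>
          (pvGo rest s).map ((if c == '0' then '1' else '0') :: ·)
          ++ (pvGo rest (s+1)).map (c :: ·)

-- negative distance: Python's go recurses to the end and returns [] (k < 0 never reaches 0);
-- with Nat flips this is the explicit branch below
def hamming_neighbors_alt (label : String) (distance : Int) : List String :=
  if distance < 0 then [] else
  PySem.Set.ofList ((pvGo label.toList distance.toNat).map String.mk)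

-- ===== PRECONDITION & SPEC =====
-- A raises ValueError (itertools.combinations) when distance < 0
def Pre_hamming_neighbors (label : String) (distance : Int) : Prop := 0 ≤ distance
instance (label : String) (distance : Int) : Decidable (Pre_hamming_neighbors label distance) := by
  unfold Pre_hamming_neighbors; infer_instance

def pvWitness_hamming_neighbors : String × Int := ("01", 1)

def Spec_hamming_neighbors (label : String) (distance : Int) (out : List String) : Prop :=
  out = hamming_neighbors_alt label distance
instance (label : String) (distance : Int) (out : List String) : Decidable (Spec_hamming_neighbors label distance out) := by
  unfold Spec_hamming_neighbors; infer_instance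

-- ===== CLAIM (what is proved, stated in full; the proofs are below) =====
def Claim_equal_hamming_neighbors : Prop := ∀ (label : String) (distance : Int), Dom_hamming_neighbors label distance → Pre_hamming_neighbors label distance → Spec_hamming_neighbors label distance (hamming_neighbors label distance)

-- ===== LEMMAS AND PROOFS =====

lemma pvGo_of_lt (cs : List Char) (k : Nat) (h : cs.length < k) : pvGo cs k = [] := by
  rw [pvGo.eq_def]; simp [h]

lemma pvGo_nil (k : Nat) : pvGo [] k = if k = 0 then [[]] else [] := by
  rw [pvGo.eq_def]; cases k <;> simp

lemma pvGo_cons_zero (c : Char) (rest : List Char) :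
    pvGo (c :: rest) 0 = (pvGo rest 0).map (c :: ·) := by
  rw [pvGo.eq_def]; simp

lemma pvGo_cons_succ (c : Char) (rest : List Char) (s : Nat) :
    pvGo (c :: rest) (s+1)
    = (pvGo rest s).map ((if c == '0' then '1' else '0') :: ·)
      ++ (pvGo rest (s+1)).map (c :: ·) := by
  rw [pvGo.eq_def]
  by_cases h : rest.length < s
  · simp [Nat.succ_lt_succ h, pvGo_of_lt rest s h,
      pvGo_of_lt rest (s+1) (Nat.lt_succ_of_lt h)]
  · simp [h]

lemma pvGo_zero (cs : List Char) : pvGo cs 0 = [cs] := by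
  induction cs with
  | nil => simp [pvGo_nil]
  | cons c rest ih => simp [pvGo_cons_zero, ih]

lemma pvFlipAt_at_length (p : List Char) (c : Char) (rest : List Char) :
    pvFlipAt (p ++ c :: rest) (p.length : Int)
    = p ++ (if c == '0' then '1' else '0') :: rest := by
  unfold pvFlipAt
  rw [PySem.List.pySetD_natCast, PySem.List.pyGetD_natCast]
  have hget : (p ++ c :: rest).getD p.length ' ' = c := by
    simp [List.getD]
  rw [hget]
  induction p with
  | nil => simp
  | cons x xs _ => simp

lemma pvKey (cs : List Char) : ∀ (p : List Char) (k : Nat),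
    (pvComb (PySem.List.pyRange (p.length : Int) ((p.length : Int) + (cs.length : Int)) 1) k).map
      (fun combo => combo.foldl pvFlipAt (p ++ cs))
    = (pvGo cs k).map (p ++ ·) := by
  induction cs with
  | nil =>
    intro p k
    have hr : PySem.List.pyRange (p.length : Int) ((p.length : Int) + 0) 1 = [] := by
      simp
    simp only [List.length_nil, Nat.cast_zero, hr, pvGo_nil]
    cases k with
    | zero => simp [pvComb]
    | succ s => simp [pvComb]
  | cons c rest ih =>
    intro p k
    have hcons : PySem.List.pyRange (p.length : Int) ((p.length : Int) + ((c :: rest).length : Int)) 1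
        = (p.length : Int) :: PySem.List.pyRange ((p.length : Int) + 1) ((p.length : Int) + ((c :: rest).length : Int)) 1 := by
      apply PySem.List.pyRange_one_cons
      simp
    cases k with
    | zero =>
      simp [pvComb, pvGo_zero]
    | succ s =>
      have hend : ((p.length : Int) + ((c :: rest).length : Int)) = (p.length : Int) + 1 + (rest.length : Int) := by
        push_cast [List.length_cons]; ring
      rw [hcons, hend]
      simp only [pvComb, List.map_append, List.map_map, pvGo_cons_succ]
      congr 1
      · -- flip branch
        have e2 : (((p ++ [(if c == '0' then '1' else '0')]).length : Int)) = (p.length : Int) + 1 := by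
          push_cast [List.length_append, List.length_cons, List.length_nil]; ring
        have ihf := ih (p ++ [(if c == '0' then '1' else '0')]) s
        rw [e2] at ihf
        simp only [List.append_assoc, List.cons_append, List.nil_append] at ihf
        simp only [Function.comp_def, List.foldl_cons, pvFlipAt_at_length]
        exact ihf
      · -- keep branch
        have e2 : (((p ++ [c]).length : Int)) = (p.length : Int) + 1 := by
          push_cast [List.length_append, List.length_cons, List.length_nil]; ring
        have ihk := ih (p ++ [c]) (s+1)
        rw [e2] at ihk
        simp only [List.append_assoc, List.cons_append, List.nil_append] at ihk
        simp only [Function.comp_def]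
        exact ihk

-- ===== VERDICT (by name: the statement is the Claim_ definition above) =====
theorem hamming_neighbors_spec : Claim_equal_hamming_neighbors := by
  intro label distance _ hpre
  unfold Spec_hamming_neighbors hamming_neighbors hamming_neighbors_alt
  have hnn : ¬ distance < 0 := not_lt.mpr hpre
  simp only [hnn, if_false]
  have hkey := pvKey label.toList [] distance.toNat
  simp only [List.length_nil, Nat.cast_zero, zero_add, List.nil_append, List.map_id'] at hkey
  rw [PySem.Set.ofList_eq_foldl, List.foldl_map, ← hkey, List.foldl_map]
  rfl
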